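-- pv_equiv track=rewrite | github.com/SerafimBatzoglou/concept-synth | benchmarks/abduction/scripts/refresh_release_artifacts.py | _count_models
-- ===== SOURCE A (Python) =====
-- from typing import Any, Dict, Iterable, List, Tuple
--
-- def _count_models(rows: Iterable[Dict[str, Any]], key: str) -> Tuple[List[str], Dict[str, int], int]:
--     model_order: List[str] = []
--     model_counts: Dict[str, int] = {}
--     total = 0
--     for row in rows:
--         model = str(row[key])
--         if model not in model_counts:
--             model_order.append(model)
--             model_counts[model] = 0
--         model_counts[model] += 1
--         total += 1
--     return model_order, model_counts, total
-- ===== SOURCE B (Python) =====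
-- from typing import Any, Dict, Iterable, List, Tuple
--
--
-- def _count_models(rows: Iterable[Dict[str, Any]], key: str) -> Tuple[List[str], Dict[str, int], int]:
--     models = [str(row[key]) for row in rows]
--     order = list(dict.fromkeys(models))
--     counts = {m: models.count(m) for m in order}
--     return order, counts, len(models)
-- ===== Notes on version B (the rewrite author's own statement) =====
-- stated objective: alternative
-- what changed: Replaces A's single guarded pass that maintains an order list, a count dict and a running total simultaneously by staged passes: materialise the model strings, dedup them with dict.fromkeys for first-seen order, then compute each distinct model's count by a separate models.count scan and the total as len(models).
import Mathlib
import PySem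

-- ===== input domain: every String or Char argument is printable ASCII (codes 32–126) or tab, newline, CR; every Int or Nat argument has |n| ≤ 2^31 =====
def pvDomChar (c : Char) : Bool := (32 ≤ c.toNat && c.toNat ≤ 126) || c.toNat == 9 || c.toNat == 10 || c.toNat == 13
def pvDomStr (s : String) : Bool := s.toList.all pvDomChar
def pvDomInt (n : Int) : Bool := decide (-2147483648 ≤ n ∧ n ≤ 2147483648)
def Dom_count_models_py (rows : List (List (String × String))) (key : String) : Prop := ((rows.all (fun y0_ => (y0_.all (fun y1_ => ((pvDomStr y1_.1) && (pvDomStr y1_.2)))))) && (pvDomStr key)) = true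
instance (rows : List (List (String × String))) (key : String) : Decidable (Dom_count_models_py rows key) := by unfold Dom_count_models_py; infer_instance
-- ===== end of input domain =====

-- B replaces A's single guarded pass (order list + count dict + running total maintained together)
-- by staged passes: dedup for order, a models.count scan per distinct model, len for the total; same values, no speed claim.

-- row[key] as Python evaluates it on a dict row: `none` = KeyError (excluded by Pre_);
-- str(row[key]) is the value itself, since all values here are strings.
def pyModel (row : List (String × String)) (key : String) : String :=
  (((PySem.Dict.ofList row).get? key).getD "")

-- ===== PORT A =====
-- one pass: state (model_order, model_counts, total), branch on membership exactly as A does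
def count_models_py (rows : List (List (String × String))) (key : String) :
    List String × (List (String × Int)) × Int :=
  let st := rows.foldl
    (fun (st : List String × PySem.Dict String Int × Int) row =>
      let model := pyModel row key
      let st1 := if st.2.1.contains model then (st.1, st.2.1)
                 else (st.1 ++ [model], st.2.1.insert model 0)
      (st1.1, st1.2.modify model 0 (· + 1), st.2.2 + 1))
    (([] : List String), (PySem.Dict.empty : PySem.Dict String Int), (0 : Int))
  (st.1, st.2.1.items, st.2.2)

-- ===== PORT B =====
-- staged: models list; order = list(dict.fromkeys(models)); counts dict built from models.count(m) per distinct m; total = len(models)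
def count_models_py_alt (rows : List (List (String × String))) (key : String) :
    List String × (List (String × Int)) × Int :=
  let models := rows.map (fun row => pyModel row key)
  let order := PySem.List.dedup models
  let counts := order.foldl
    (fun (d : PySem.Dict String Int) m => d.insert m (models.count m : Int))
    PySem.Dict.empty
  (order, counts.items, (models.length : Int))

-- ===== PRECONDITION & SPEC =====
-- Pre_ excludes exactly the inputs on which row[key] raises KeyError in A (and in B alike).
def Pre_count_models_py (rows : List (List (String × String))) (key : String) : Prop :=
  ∀ row ∈ rows, key ∈ row.map Prod.fst
instance (rows : List (List (String × String))) (key : String) : Decidable (Pre_count_models_py rows key) := by unfold Pre_count_models_py; infer_instance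

def pvWitness_count_models_py : (List (List (String × String))) × String :=
  ([[("model", "gpt"), ("score", "1")], [("model", "claude")]], "model")

def Spec_count_models_py (rows : List (List (String × String))) (key : String) (out : List String × (List (String × Int)) × Int) : Prop := out = count_models_py_alt rows key
instance (rows : List (List (String × String))) (key : String) (out : List String × (List (String × Int)) × Int) : Decidable (Spec_count_models_py rows key out) := by unfold Spec_count_models_py; infer_instance

-- ===== CLAIM (what is proved, stated in full; the proofs are below) =====
def Claim_equal_count_models_py : Prop := ∀ (rows : List (List (String × String))) (key : String), Dom_count_models_py rows key → Pre_count_models_py rows key → Spec_count_models_py rows key (count_models_py rows key)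

-- ===== LEMMAS AND PROOFS =====

-- A's loop body, over the extracted model string
def stepA (st : List String × PySem.Dict String Int × Int) (model : String) :
    List String × PySem.Dict String Int × Int :=
  let st1 := if st.2.1.contains model then (st.1, st.2.1)
             else (st.1 ++ [model], st.2.1.insert model 0)
  (st1.1, st1.2.modify model 0 (· + 1), st.2.2 + 1)

-- on a fresh key, A's insert-0-then-increment is one Counter step
lemma insert_zero_modify (d : PySem.Dict String Int) (m : String) (h : d.contains m = false) :
    (d.insert m 0).modify m 0 (· + 1) = d.modify m 0 (· + 1) := by
  show (d.insert m 0).insert m ((d.insert m 0).getD m 0 + 1) = d.insert m (d.getD m 0 + 1)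
  rw [PySem.Dict.getD_insert_self, PySem.Dict.insert_insert_self,
      PySem.Dict.getD_of_not_contains d 0 h]

-- A's loop with the invariant "order list = keys of the counts dict"
lemma loopA (ms : List String) : ∀ (order : List String) (d : PySem.Dict String Int) (t : Int),
    order = d.keys →
    ms.foldl stepA (order, d, t) =
      ((ms.foldl (fun d m => d.modify m 0 (· + 1)) d).keys,
       ms.foldl (fun d m => d.modify m 0 (· + 1)) d,
       t + (ms.length : Int)) := by
  induction ms with
  | nil => intro order d t h; simp [h]
  | cons m ms ih =>
    intro order d t h
    by_cases hc : d.contains m = true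
    · have hkeys : (d.modify m 0 (· + 1)).keys = d.keys :=
        PySem.Dict.keys_insert_of_contains d _ hc
      simp only [List.foldl_cons, stepA, hc, if_pos]
      rw [ih order (d.modify m 0 (· + 1)) (t + 1) (by rw [hkeys, h])]
      simp only [Prod.mk.injEq]
      refine ⟨trivial, trivial, ?_⟩
      simp only [List.length_cons]; push_cast; ring
    · have hc' : d.contains m = false := by simpa using hc
      have hkeys : ((d.insert m 0).modify m 0 (· + 1)).keys = d.keys ++ [m] := by
        rw [insert_zero_modify d m hc']
        exact PySem.Dict.keys_insert_of_not_contains d _ hc'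
      simp only [List.foldl_cons, stepA, hc', Bool.false_eq_true, if_false]
      rw [insert_zero_modify d m hc']
      rw [ih (order ++ [m]) (d.modify m 0 (· + 1)) (t + 1)
        (by rw [← insert_zero_modify d m hc', hkeys, h])]
      simp only [Prod.mk.injEq]
      refine ⟨trivial, trivial, ?_⟩
      simp only [List.length_cons]; push_cast; ring

-- B's staged dict of counts has exactly Counter's items
lemma items_counts_dict (models : List String) :
    ((PySem.List.dedup models).foldl
      (fun (d : PySem.Dict String Int) m => d.insert m (models.count m : Int))
      PySem.Dict.empty).items
    = (PySem.Dict.counter models).items := by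
  have h := PySem.Dict.items_foldl_insert_fresh (d := (PySem.Dict.empty : PySem.Dict String Int))
      (l := PySem.List.dedup models) (k := fun m => m)
      (v := fun m => (models.count m : Int))
      (fun a _ => PySem.Dict.contains_empty a)
      (by simp)
  rw [PySem.Dict.items_counter]
  simpa [PySem.List.dedup_eq_ofList, PySem.Dict.empty] using h

-- ===== VERDICT (by name: the statement is the Claim_ definition above) =====
theorem count_models_py_spec : Claim_equal_count_models_py := by
  intro rows key _ _
  unfold Spec_count_models_py
  simp only [count_models_py, count_models_py_alt]
  have hfold : rows.foldl
      (fun (st : List String × PySem.Dict String Int × Int) row =>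
        let model := pyModel row key
        let st1 := if st.2.1.contains model then (st.1, st.2.1)
                   else (st.1 ++ [model], st.2.1.insert model 0)
        (st1.1, st1.2.modify model 0 (· + 1), st.2.2 + 1))
      ([], PySem.Dict.empty, 0)
      = (rows.map (fun row => pyModel row key)).foldl stepA ([], PySem.Dict.empty, 0) := by
    rw [List.foldl_map]; rfl
  rw [hfold,
    loopA (rows.map (fun row => pyModel row key)) [] PySem.Dict.empty 0 (by simp)]
  dsimp only
  rw [← PySem.Dict.counter_eq_foldl, items_counts_dict,
    PySem.Dict.keys_counter, PySem.List.dedup_eq_ofList]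
  simp
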